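-- pv_equiv track=rewrite | github.com/edebbyi/dianalysis | dianalysis/off_pipeline.py | map_category_and_group
-- ===== SOURCE A (Python) =====
-- def extract_categories(product):
--     """Extract and clean category tags from OFF product."""
--     raw = product.get("categories_hierarchy") or product.get("categories_tags") or []
--     cats = []
--     for c in raw:
--         try:
--             s = str(c).strip().lower()
--             if not s:
--                 continue
--             if ":" in s:
--                 s = s.split(":")[-1]
--             cats.append(s)
--         except Exception:
--             continue
--     return cats
--
-- def map_category_and_group(product):
--     """Map OFF product to (category, alt_group) tuple."""
--     cats = extract_categories(product)
--
--     def has(*subs):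
--         return any(any(s in c for s in subs) for c in cats)
--
--     if has("oat", "oats", "porridge", "rolled-oats", "oatmeal", "granola", "muesli"):
--         return ("grain", "oats")
--     if has("rice", "brown-rice", "white-rice", "basmati", "jasmine", "wild-rice"):
--         return ("grain", "rice")
--     if has("quinoa"):
--         return ("grain", "quinoa")
--     if has("pasta", "noodles", "spaghetti", "penne", "macaroni", "ramen", "udon", "soba"):
--         return ("grain", "pasta-noodles")
--
--     if has("chips", "chip", "crisps", "nacho", "nachos", "tortilla-chips", "tortilla chips"):
--         return ("snack", "snack")
--
--     if has("bread", "breads", "bakery", "loaves", "bagel", "bagels",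
--            "flatbread", "flatbreads", "wrap", "wraps",
--            "bun", "buns", "roll", "rolls", "pita", "naan", "ciabatta"):
--         return ("bread", "bread")
--
--     if has("breakfast-cereals", "cereals"):
--         if has("granola", "muesli"):
--             return ("cereal", "granola")
--         return ("cereal", "cereal")
--
--     if has("beverages", "drinks", "soft-drinks", "sodas", "juice", "juices", "water"):
--         return ("drink", "drink")
--
--     if has("ice-cream", "ice-creams", "frozen-dessert", "frozen-desserts"):
--         return ("dessert", "ice-cream")
--
--     if has("dairies", "dairy", "milk", "yogurt", "cheese", "cream"):
--         return ("dairy", "dairy")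
--
--     if has("nuts", "nuts-and-seeds", "almonds", "cashews", "peanuts", "pistachios", "walnuts", "hazelnuts",
--            "pecans", "macadamia", "seeds", "sunflower-seeds", "pumpkin-seeds", "chia", "flax",
--            "trail-mix", "nut-mix", "seed-mix"):
--         return ("nut", "nuts-seeds")
--
--     if has("snacks", "chips", "crisps", "crackers", "popcorn", "bars"):
--         return ("snack", "snack")
--
--     return ("snack", "snack")
-- ===== SOURCE B (Python) =====
-- # (substrings, (category, group)) in priority order; bit i of the mask means "rule i matched".
-- # The original's nested cereal->granola branch is dead code (granola/muesli already hit rule 0),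
-- # so one ('cereal','cereal') entry covers it.
-- RULES = [
--     (("oat", "oats", "porridge", "rolled-oats", "oatmeal", "granola", "muesli"), ("grain", "oats")),
--     (("rice", "brown-rice", "white-rice", "basmati", "jasmine", "wild-rice"), ("grain", "rice")),
--     (("quinoa",), ("grain", "quinoa")),
--     (("pasta", "noodles", "spaghetti", "penne", "macaroni", "ramen", "udon", "soba"), ("grain", "pasta-noodles")),
--     (("chips", "chip", "crisps", "nacho", "nachos", "tortilla-chips", "tortilla chips"), ("snack", "snack")),
--     (("bread", "breads", "bakery", "loaves", "bagel", "bagels", "flatbread", "flatbreads",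
--       "wrap", "wraps", "bun", "buns", "roll", "rolls", "pita", "naan", "ciabatta"), ("bread", "bread")),
--     (("breakfast-cereals", "cereals"), ("cereal", "cereal")),
--     (("beverages", "drinks", "soft-drinks", "sodas", "juice", "juices", "water"), ("drink", "drink")),
--     (("ice-cream", "ice-creams", "frozen-dessert", "frozen-desserts"), ("dessert", "ice-cream")),
--     (("dairies", "dairy", "milk", "yogurt", "cheese", "cream"), ("dairy", "dairy")),
--     (("nuts", "nuts-and-seeds", "almonds", "cashews", "peanuts", "pistachios", "walnuts", "hazelnuts",
--       "pecans", "macadamia", "seeds", "sunflower-seeds", "pumpkin-seeds", "chia", "flax",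
--       "trail-mix", "nut-mix", "seed-mix"), ("nut", "nuts-seeds")),
--     (("snacks", "chips", "crisps", "crackers", "popcorn", "bars"), ("snack", "snack")),
-- ]
--
--
-- def map_category_and_group(product):
--     """Map OFF product to (category, alt_group) tuple.
--
--     Single fused pass: each raw tag is cleaned and matched against every rule,
--     accumulating an integer bitmask of matched rules; the answer is the rule of
--     the lowest set bit (highest priority), defaulting to ("snack", "snack").
--     """
--     raw = product.get("categories_hierarchy") or product.get("categories_tags") or []
--     mask = 0
--     for c in raw:
--         s = str(c).strip().lower()
--         if not s:
--             continue
--         if ":" in s: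
--             s = s.split(":")[-1]
--         for i, (subs, _) in enumerate(RULES):
--             if any(sub in s for sub in subs):
--                 mask |= 1 << i
--     for i, (_, result) in enumerate(RULES):
--         if (mask >> i) & 1:
--             return result
--     return ("snack", "snack")
-- ===== Notes on version B (the rewrite author's own statement) =====
-- stated objective: alternative
-- what changed: Instead of an if-ladder that rescans the extracted category list once per rule with early return, B makes one fused pass over the raw tags (cleaning each tag inline) accumulating an integer bitmask of all matched rules, then decodes the lowest set bit into the answer; the dead nested cereal-granola branch collapses into a single cereal entry.
import Mathlib
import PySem

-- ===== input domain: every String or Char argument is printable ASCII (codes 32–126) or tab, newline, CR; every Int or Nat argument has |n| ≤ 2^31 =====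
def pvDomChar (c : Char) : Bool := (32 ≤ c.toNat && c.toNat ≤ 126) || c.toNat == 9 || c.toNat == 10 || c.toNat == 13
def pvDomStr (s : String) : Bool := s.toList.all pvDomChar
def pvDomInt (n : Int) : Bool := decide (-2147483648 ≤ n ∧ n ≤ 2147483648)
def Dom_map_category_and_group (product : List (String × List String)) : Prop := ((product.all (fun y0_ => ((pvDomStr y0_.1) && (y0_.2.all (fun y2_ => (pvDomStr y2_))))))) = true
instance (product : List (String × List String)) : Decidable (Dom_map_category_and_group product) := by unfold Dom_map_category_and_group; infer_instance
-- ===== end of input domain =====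

-- B replaces A's early-return if-ladder (which rescans the extracted categories once per rule)
-- by one fused pass over the raw tags accumulating a bitmask of matched rules, then decodes the
-- lowest set bit; same return values (alternative structure, no speed claim).

-- ===== PORT A =====
-- 'x or y' on dict.get results (None / possibly-empty list): falsy means none or []
def pvOrFalsy (o : Option (List String)) (d : List String) : List String :=
  match o with
  | some l => if l = [] then d else l
  | none => d

-- raw = product.get("categories_hierarchy") or product.get("categories_tags") or []
-- (identical line in both Pythons, so shared by both ports)
def pvRawOf (product : List (String × List String)) : List String :=
  pvOrFalsy ((PySem.Dict.mk product).get? "categories_hierarchy")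
    (pvOrFalsy ((PySem.Dict.mk product).get? "categories_tags") [])

-- s.split(":")[-1]; split on a nonempty separator is never empty, so the default is unreachable
def pvLastSeg (s : String) : String :=
  String.ofList ((PySem.Chars.splitOn s.toList [':']).getLastD [])

def extract_categories (product : List (String × List String)) : List String :=
  (pvRawOf product).foldl
    (fun cats c =>
      let s := PySem.Str.lower (PySem.Str.strip c)
      if s = "" then cats
      else cats ++ [if PySem.Str.isIn ":" s then pvLastSeg s else s])
    []

-- has(*subs) = any(any(s in c for s in subs) for c in cats)
def pvHas (cats subs : List String) : Bool :=
  cats.any (fun c => subs.any (fun s => PySem.Str.isIn s c))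

-- the if-ladder over the extracted categories
def pvLadder (cats : List String) : String × String :=
  if pvHas cats ["oat", "oats", "porridge", "rolled-oats", "oatmeal", "granola", "muesli"] then ("grain", "oats")
  else if pvHas cats ["rice", "brown-rice", "white-rice", "basmati", "jasmine", "wild-rice"] then ("grain", "rice")
  else if pvHas cats ["quinoa"] then ("grain", "quinoa")
  else if pvHas cats ["pasta", "noodles", "spaghetti", "penne", "macaroni", "ramen", "udon", "soba"] then ("grain", "pasta-noodles")
  else if pvHas cats ["chips", "chip", "crisps", "nacho", "nachos", "tortilla-chips", "tortilla chips"] then ("snack", "snack")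
  else if pvHas cats ["bread", "breads", "bakery", "loaves", "bagel", "bagels",
      "flatbread", "flatbreads", "wrap", "wraps",
      "bun", "buns", "roll", "rolls", "pita", "naan", "ciabatta"] then ("bread", "bread")
  else if pvHas cats ["breakfast-cereals", "cereals"] then
    (if pvHas cats ["granola", "muesli"] then ("cereal", "granola") else ("cereal", "cereal"))
  else if pvHas cats ["beverages", "drinks", "soft-drinks", "sodas", "juice", "juices", "water"] then ("drink", "drink")
  else if pvHas cats ["ice-cream", "ice-creams", "frozen-dessert", "frozen-desserts"] then ("dessert", "ice-cream")
  else if pvHas cats ["dairies", "dairy", "milk", "yogurt", "cheese", "cream"] then ("dairy", "dairy")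
  else if pvHas cats ["nuts", "nuts-and-seeds", "almonds", "cashews", "peanuts", "pistachios", "walnuts", "hazelnuts",
      "pecans", "macadamia", "seeds", "sunflower-seeds", "pumpkin-seeds", "chia", "flax",
      "trail-mix", "nut-mix", "seed-mix"] then ("nut", "nuts-seeds")
  else if pvHas cats ["snacks", "chips", "crisps", "crackers", "popcorn", "bars"] then ("snack", "snack")
  else ("snack", "snack")

def map_category_and_group (product : List (String × List String)) : String × String :=
  pvLadder (extract_categories product)

-- ===== PORT B =====
-- enumerate(RULES) written out with its indices (RULES is a module-level literal in Source B)
def pvRules : List (Nat × List String × String × String) :=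
  [ (0, ["oat", "oats", "porridge", "rolled-oats", "oatmeal", "granola", "muesli"], ("grain", "oats")),
    (1, ["rice", "brown-rice", "white-rice", "basmati", "jasmine", "wild-rice"], ("grain", "rice")),
    (2, ["quinoa"], ("grain", "quinoa")),
    (3, ["pasta", "noodles", "spaghetti", "penne", "macaroni", "ramen", "udon", "soba"], ("grain", "pasta-noodles")),
    (4, ["chips", "chip", "crisps", "nacho", "nachos", "tortilla-chips", "tortilla chips"], ("snack", "snack")),
    (5, ["bread", "breads", "bakery", "loaves", "bagel", "bagels", "flatbread", "flatbreads",
      "wrap", "wraps", "bun", "buns", "roll", "rolls", "pita", "naan", "ciabatta"], ("bread", "bread")),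
    (6, ["breakfast-cereals", "cereals"], ("cereal", "cereal")),
    (7, ["beverages", "drinks", "soft-drinks", "sodas", "juice", "juices", "water"], ("drink", "drink")),
    (8, ["ice-cream", "ice-creams", "frozen-dessert", "frozen-desserts"], ("dessert", "ice-cream")),
    (9, ["dairies", "dairy", "milk", "yogurt", "cheese", "cream"], ("dairy", "dairy")),
    (10, ["nuts", "nuts-and-seeds", "almonds", "cashews", "peanuts", "pistachios", "walnuts", "hazelnuts",
      "pecans", "macadamia", "seeds", "sunflower-seeds", "pumpkin-seeds", "chia", "flax",
      "trail-mix", "nut-mix", "seed-mix"], ("nut", "nuts-seeds")),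
    (11, ["snacks", "chips", "crisps", "crackers", "popcorn", "bars"], ("snack", "snack")) ]

-- the inner rules loop: mask |= 1 << i for every rule whose substrings hit s
def pvSetBits (s : String) (mask : Nat) : Nat :=
  pvRules.foldl (fun m p => if p.2.1.any (fun sub => PySem.Str.isIn sub s) then m ||| (1 <<< p.1) else m) mask

-- the outer loop over raw: clean each tag inline and fold it into the mask
def pvMaskOf (raw : List String) : Nat :=
  raw.foldl (fun mask c =>
    let s := PySem.Str.lower (PySem.Str.strip c)
    if s = "" then mask
    else pvSetBits (if PySem.Str.isIn ":" s then pvLastSeg s else s) mask) 0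

-- the decode loop: first rule whose bit is set ((mask >> i) & 1), else the default
def pvDecode (mask : Nat) : List (Nat × List String × String × String) → String × String
  | [] => ("snack", "snack")
  | p :: rest => if (mask >>> p.1) &&& 1 == 1 then p.2.2 else pvDecode mask rest

def map_category_and_group_alt (product : List (String × List String)) : String × String :=
  pvDecode (pvMaskOf (pvRawOf product)) pvRules

-- ===== PRECONDITION & SPEC =====
def Spec_map_category_and_group (product : List (String × List String)) (out : String × String) : Prop := out = map_category_and_group_alt product
instance (product : List (String × List String)) (out : String × String) : Decidable (Spec_map_category_and_group product out) := by unfold Spec_map_category_and_group; infer_instance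

-- ===== CLAIM (what is proved, stated in full; the proofs are below) =====
def Claim_equal_map_category_and_group : Prop := ∀ (product : List (String × List String)), Dom_map_category_and_group product → Spec_map_category_and_group product (map_category_and_group product)

-- ===== LEMMAS AND PROOFS =====

-- transformed categories of a raw tag list (B processes them inline, A collects them first)
def pvCatsOf (raw : List String) : List String :=
  ((raw.map (fun c => PySem.Str.lower (PySem.Str.strip c))).filter
      (fun s => ¬ s = "")).map (fun s => if PySem.Str.isIn ":" s then pvLastSeg s else s)

-- A's accumulator loop computes pvCatsOf
theorem pv_extract_eq_comprehension (raw acc : List String) :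
    raw.foldl
      (fun cats c =>
        let s := PySem.Str.lower (PySem.Str.strip c)
        if s = "" then cats
        else cats ++ [if PySem.Str.isIn ":" s then pvLastSeg s else s]) acc
    = acc ++ pvCatsOf raw := by
  induction raw generalizing acc with
  | nil => simp [pvCatsOf]
  | cons c rest ih =>
      simp only [pvCatsOf, List.foldl_cons, List.map_cons, List.filter_cons]
      by_cases h : PySem.Str.lower (PySem.Str.strip c) = ""
      · simpa [pvCatsOf, h] using ih acc
      · simpa [pvCatsOf, h] using ih (acc ++ [if PySem.Str.isIn ":" (PySem.Str.lower (PySem.Str.strip c))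
          then pvLastSeg (PySem.Str.lower (PySem.Str.strip c))
          else PySem.Str.lower (PySem.Str.strip c)])

-- B's fused pass is the mask-fold over the cleaned categories
theorem pv_maskOf_eq_catsfold (raw : List String) (m : Nat) :
    raw.foldl (fun mask c =>
      let s := PySem.Str.lower (PySem.Str.strip c)
      if s = "" then mask
      else pvSetBits (if PySem.Str.isIn ":" s then pvLastSeg s else s) mask) m
    = (pvCatsOf raw).foldl (fun mask s => pvSetBits s mask) m := by
  induction raw generalizing m with
  | nil => simp [pvCatsOf]
  | cons c rest ih =>
      simp only [pvCatsOf, List.foldl_cons, List.map_cons, List.filter_cons]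
      by_cases h : PySem.Str.lower (PySem.Str.strip c) = ""
      · simpa [pvCatsOf, h] using ih m
      · simpa [pvCatsOf, h] using ih (pvSetBits (if PySem.Str.isIn ":" (PySem.Str.lower (PySem.Str.strip c))
          then pvLastSeg (PySem.Str.lower (PySem.Str.strip c))
          else PySem.Str.lower (PySem.Str.strip c)) m)

-- which bits the inner rules loop sets (generic over the rule list)
theorem pv_setbits_testBit_gen (L : List (Nat × List String × String × String)) (s : String) (m : Nat) (j : Nat) :
    Nat.testBit (L.foldl (fun m p => if p.2.1.any (fun sub => PySem.Str.isIn sub s) then m ||| (1 <<< p.1) else m) m) j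
    = (Nat.testBit m j || L.any (fun p => p.1 == j && p.2.1.any (fun sub => PySem.Str.isIn sub s))) := by
  induction L generalizing m with
  | nil => simp
  | cons p rest ih =>
      simp only [List.foldl_cons, List.any_cons]
      by_cases h : p.2.1.any (fun sub => PySem.Str.isIn sub s) = true
      · rw [if_pos h, ih]
        simp only [Nat.testBit_or, Nat.shiftLeft_eq, Nat.testBit_two_pow, one_mul]
        rw [Bool.eq_iff_iff]
        simp only [Bool.or_eq_true, Bool.and_eq_true, decide_eq_true_eq, beq_iff_eq, h, and_true]
        tauto
      · rw [if_neg h, ih]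
        rw [Bool.eq_iff_iff]
        simp only [Bool.or_eq_true, Bool.and_eq_true, beq_iff_eq]
        tauto

-- bit j of the final mask = "some category hits rule j"
theorem pv_mask_testBit (cats : List String) (m : Nat) (j : Nat) :
    Nat.testBit (cats.foldl (fun mask s => pvSetBits s mask) m) j
    = (Nat.testBit m j || cats.any (fun s => pvRules.any (fun p => p.1 == j && p.2.1.any (fun sub => PySem.Str.isIn sub s)))) := by
  induction cats generalizing m with
  | nil => simp
  | cons s rest ih =>
      simp only [List.foldl_cons, List.any_cons]
      rw [ih, pvSetBits, pv_setbits_testBit_gen]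
      simp [Bool.or_assoc]

-- (mask >> j) & 1 == 1 is the j-th bit
theorem pv_and_one (mask j : Nat) : ((mask >>> j) &&& 1 == 1) = Nat.testBit mask j := by
  have h : (mask >>> j) &&& 1 = (mask >>> j) % 2 := Nat.and_one_is_mod _
  rw [Nat.testBit, Nat.one_and_eq_mod_two, h]
  have := Nat.mod_two_eq_zero_or_one (mask >>> j)
  rcases this with h2 | h2 <;> simp [h2]

-- rule 0's contribution to bit 0 is exactly A's has(...) test for that rule
theorem pv_hit0 (cats : List String) :
    (cats.any fun s => pvRules.any fun p => p.1 == 0 && p.2.1.any fun sub => PySem.Str.isIn sub s)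
    = pvHas cats ["oat", "oats", "porridge", "rolled-oats", "oatmeal", "granola", "muesli"] := by
  simp [pvRules, pvHas]

-- rule 1's contribution to bit 1 is exactly A's has(...) test for that rule
theorem pv_hit1 (cats : List String) :
    (cats.any fun s => pvRules.any fun p => p.1 == 1 && p.2.1.any fun sub => PySem.Str.isIn sub s)
    = pvHas cats ["rice", "brown-rice", "white-rice", "basmati", "jasmine", "wild-rice"] := by
  simp [pvRules, pvHas]

-- rule 2's contribution to bit 2 is exactly A's has(...) test for that rule
theorem pv_hit2 (cats : List String) :
    (cats.any fun s => pvRules.any fun p => p.1 == 2 && p.2.1.any fun sub => PySem.Str.isIn sub s)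
    = pvHas cats ["quinoa"] := by
  simp [pvRules, pvHas]

-- rule 3's contribution to bit 3 is exactly A's has(...) test for that rule
theorem pv_hit3 (cats : List String) :
    (cats.any fun s => pvRules.any fun p => p.1 == 3 && p.2.1.any fun sub => PySem.Str.isIn sub s)
    = pvHas cats ["pasta", "noodles", "spaghetti", "penne", "macaroni", "ramen", "udon", "soba"] := by
  simp [pvRules, pvHas]

-- rule 4's contribution to bit 4 is exactly A's has(...) test for that rule
theorem pv_hit4 (cats : List String) :
    (cats.any fun s => pvRules.any fun p => p.1 == 4 && p.2.1.any fun sub => PySem.Str.isIn sub s)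
    = pvHas cats ["chips", "chip", "crisps", "nacho", "nachos", "tortilla-chips", "tortilla chips"] := by
  simp [pvRules, pvHas]

-- rule 5's contribution to bit 5 is exactly A's has(...) test for that rule
theorem pv_hit5 (cats : List String) :
    (cats.any fun s => pvRules.any fun p => p.1 == 5 && p.2.1.any fun sub => PySem.Str.isIn sub s)
    = pvHas cats ["bread", "breads", "bakery", "loaves", "bagel", "bagels", "flatbread", "flatbreads", "wrap", "wraps", "bun", "buns", "roll", "rolls", "pita", "naan", "ciabatta"] := by
  simp [pvRules, pvHas]

-- rule 6's contribution to bit 6 is exactly A's has(...) test for that rule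
theorem pv_hit6 (cats : List String) :
    (cats.any fun s => pvRules.any fun p => p.1 == 6 && p.2.1.any fun sub => PySem.Str.isIn sub s)
    = pvHas cats ["breakfast-cereals", "cereals"] := by
  simp [pvRules, pvHas]

-- rule 7's contribution to bit 7 is exactly A's has(...) test for that rule
theorem pv_hit7 (cats : List String) :
    (cats.any fun s => pvRules.any fun p => p.1 == 7 && p.2.1.any fun sub => PySem.Str.isIn sub s)
    = pvHas cats ["beverages", "drinks", "soft-drinks", "sodas", "juice", "juices", "water"] := by
  simp [pvRules, pvHas]

-- rule 8's contribution to bit 8 is exactly A's has(...) test for that rule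
theorem pv_hit8 (cats : List String) :
    (cats.any fun s => pvRules.any fun p => p.1 == 8 && p.2.1.any fun sub => PySem.Str.isIn sub s)
    = pvHas cats ["ice-cream", "ice-creams", "frozen-dessert", "frozen-desserts"] := by
  simp [pvRules, pvHas]

-- rule 9's contribution to bit 9 is exactly A's has(...) test for that rule
theorem pv_hit9 (cats : List String) :
    (cats.any fun s => pvRules.any fun p => p.1 == 9 && p.2.1.any fun sub => PySem.Str.isIn sub s)
    = pvHas cats ["dairies", "dairy", "milk", "yogurt", "cheese", "cream"] := by
  simp [pvRules, pvHas]

-- rule 10's contribution to bit 10 is exactly A's has(...) test for that rule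
theorem pv_hit10 (cats : List String) :
    (cats.any fun s => pvRules.any fun p => p.1 == 10 && p.2.1.any fun sub => PySem.Str.isIn sub s)
    = pvHas cats ["nuts", "nuts-and-seeds", "almonds", "cashews", "peanuts", "pistachios", "walnuts", "hazelnuts", "pecans", "macadamia", "seeds", "sunflower-seeds", "pumpkin-seeds", "chia", "flax", "trail-mix", "nut-mix", "seed-mix"] := by
  simp [pvRules, pvHas]

-- rule 11's contribution to bit 11 is exactly A's has(...) test for that rule
theorem pv_hit11 (cats : List String) :
    (cats.any fun s => pvRules.any fun p => p.1 == 11 && p.2.1.any fun sub => PySem.Str.isIn sub s)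
    = pvHas cats ["snacks", "chips", "crisps", "crackers", "popcorn", "bars"] := by
  simp [pvRules, pvHas]

-- the decode loop over the twelve rules, written as a bit-test chain
theorem pv_decode_chain (mask : Nat) : pvDecode mask pvRules =
    if Nat.testBit mask 0 then ("grain", "oats")
    else if Nat.testBit mask 1 then ("grain", "rice")
    else if Nat.testBit mask 2 then ("grain", "quinoa")
    else if Nat.testBit mask 3 then ("grain", "pasta-noodles")
    else if Nat.testBit mask 4 then ("snack", "snack")
    else if Nat.testBit mask 5 then ("bread", "bread")
    else if Nat.testBit mask 6 then ("cereal", "cereal")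
    else if Nat.testBit mask 7 then ("drink", "drink")
    else if Nat.testBit mask 8 then ("dessert", "ice-cream")
    else if Nat.testBit mask 9 then ("dairy", "dairy")
    else if Nat.testBit mask 10 then ("nut", "nuts-seeds")
    else if Nat.testBit mask 11 then ("snack", "snack")
    else ("snack", "snack") := by
  simp only [pvDecode, pvRules, pv_and_one]

-- ===== VERDICT (by name: the statement is the Claim_ definition above) =====
theorem map_category_and_group_spec : Claim_equal_map_category_and_group := by
  intro product _
  unfold Spec_map_category_and_group map_category_and_group map_category_and_group_alt
  unfold extract_categories pvMaskOf
  rw [pv_extract_eq_comprehension, pv_maskOf_eq_catsfold]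
  simp only [List.nil_append]
  set cats := pvCatsOf (pvRawOf product) with hcats
  set mask := cats.foldl (fun mask s => pvSetBits s mask) 0 with hmask
  have hb : ∀ j, Nat.testBit mask j
      = cats.any (fun s => pvRules.any (fun p => p.1 == j && p.2.1.any (fun sub => PySem.Str.isIn sub s))) := by
    intro j; rw [hmask, pv_mask_testBit]; simp
  show pvLadder cats = pvDecode mask pvRules
  rw [pv_decode_chain]
  simp only [hb,
    pv_hit0, pv_hit1, pv_hit2, pv_hit3, pv_hit4, pv_hit5, pv_hit6, pv_hit7, pv_hit8, pv_hit9, pv_hit10, pv_hit11]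
  unfold pvLadder
  by_cases hoat : pvHas cats ["oat", "oats", "porridge", "rolled-oats", "oatmeal", "granola", "muesli"] = true
  · simp only [hoat, if_pos]
  · -- the dead granola branch: a granola/muesli hit already fires the first rule
    have hg : pvHas cats ["granola", "muesli"] = false := by
      rw [Bool.eq_false_iff]
      intro hgm
      apply hoat
      unfold pvHas at hgm ⊢
      simp only [List.any_eq_true] at hgm ⊢
      obtain ⟨c, hc, t, ht, hin⟩ := hgm
      refine ⟨c, hc, t, ?_, hin⟩
      simp only [List.mem_cons, List.not_mem_nil, or_false] at ht
      rcases ht with h' | h' <;> simp [h']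
    simp [hoat, hg]
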